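-- pv_equiv track=rewrite | github.com/limnyn/python_codingtest | 프로그래머스/389479_서버_증설_횟수.py | solution
-- ===== SOURCE A (Python) =====
-- from collections import deque
--
-- def solution(players, m, k):
--
--     dq = deque([])
--     dq.append((0,0)) # (증설한 서버를 반납하는 시간, 해당 시점에 수거할 서버 개수)
--     server_add_count = 0
--     now_capable = m
--     current_server = 1
--     for time, user in enumerate(players):
--
--         if dq and dq[0][0] == time:
--             t, server_num = dq.popleft()
--             current_server -= server_num
--
--         # 현재 수용가능한 최대 인원 = server갯수 * m - 1
--         now_capable = current_server * m - 1
--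
--         if user > now_capable:
--             need_server = user//m - (current_server - 1)
--             dq.append((time + k, need_server))
--             server_add_count += need_server
--             current_server +=  need_server
--
--     return server_add_count
-- ===== SOURCE B (Python) =====
-- def solution(players, m, k):
--     # prefix[t] = total servers added during minutes 0..t-1 (a running prefix sum).
--     # A server added at minute s is rented for minutes s..s+k-1, so the extra
--     # servers active at minute t are those added in (t-k, t): prefix[t] - prefix[t-k+1].
--     prefix = [0]
--     for t, user in enumerate(players):
--         active = prefix[t] - prefix[max(t - k + 1, 0)]
--         if user > (active + 1) * m - 1:
--             prefix.append(prefix[t] + user // m - active)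
--         else:
--             prefix.append(prefix[t])
--     return prefix[-1]
-- ===== Notes on version B (the rewrite author's own statement) =====
-- stated objective: alternative
-- what changed: Replaces the event simulation (FIFO deque of scheduled returns plus a maintained current_server counter) with a running prefix-sum array of per-minute additions: the servers active at minute t are recomputed as the lookback difference prefix[t] - prefix[max(t-k+1,0)], and the answer is prefix[-1]; no queue, no release schedule, no server counter.
-- outside the precondition, e.g. on solution([3, 3], 1, 0): A returns 3, B raises IndexError
import Mathlib
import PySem

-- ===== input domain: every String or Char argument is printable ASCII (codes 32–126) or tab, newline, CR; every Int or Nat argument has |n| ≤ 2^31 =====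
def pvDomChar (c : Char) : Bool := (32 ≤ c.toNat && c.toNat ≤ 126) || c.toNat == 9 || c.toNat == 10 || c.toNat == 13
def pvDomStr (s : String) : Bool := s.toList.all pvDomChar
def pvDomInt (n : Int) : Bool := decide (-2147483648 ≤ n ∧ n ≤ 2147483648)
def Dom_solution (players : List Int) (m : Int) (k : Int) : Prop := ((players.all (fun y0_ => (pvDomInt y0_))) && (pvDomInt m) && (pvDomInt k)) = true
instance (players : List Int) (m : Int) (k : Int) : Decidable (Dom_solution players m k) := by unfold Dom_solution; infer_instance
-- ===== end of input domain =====

-- B drops A's event simulation (FIFO deque of scheduled returns + maintained server counter)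
-- for a prefix-sum array of per-minute additions, recomputing the active servers as a
-- lookback difference prefix[t] - prefix[max(t-k+1,0)] (objective: alternative, same cost).

-- ===== PORT A =====
-- one iteration of A's loop; state = (dq, (server_add_count, current_server))
def stepA (m k : Int) (st : List (Int × Int) × Int × Int) (tu : Int × Int) : List (Int × Int) × Int × Int :=
  -- if dq and dq[0][0] == time: pop front, current_server -= server_num
  let pop : List (Int × Int) × Int :=
    match st.1 with
    | [] => (st.1, st.2.2)
    | (t, sn) :: rest => if t = tu.1 then (rest, st.2.2 - sn) else (st.1, st.2.2)
  -- now_capable = current_server * m - 1; if user > now_capable: append, count, grow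
  if tu.2 > pop.2 * m - 1 then
    (pop.1 ++ [(tu.1 + k, PySem.Int.floordiv tu.2 m - (pop.2 - 1))],
     st.2.1 + (PySem.Int.floordiv tu.2 m - (pop.2 - 1)),
     pop.2 + (PySem.Int.floordiv tu.2 m - (pop.2 - 1)))
  else (pop.1, st.2.1, pop.2)

def solution (players : List Int) (m : Int) (k : Int) : Int :=
  ((PySem.List.enumerate players 0).foldl (stepA m k) ([(0, 0)], 0, 1)).2.1

-- ===== PORT B =====
-- one iteration of B's loop; state = the prefix list itself
-- (prefix[t] and prefix[max(t-k+1,0)] are in range for every input admitted by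
--  Pre_solution below, where k ≥ 1; the .getD 0 never fires there)
def stepB (m k : Int) (pre : List Int) (tu : Int × Int) : List Int :=
  let pt := PySem.List.pyGetD pre tu.1 0
  let active := pt - PySem.List.pyGetD pre (max (tu.1 - k + 1) 0) 0
  if tu.2 > (active + 1) * m - 1 then
    pre ++ [pt + PySem.Int.floordiv tu.2 m - active]
  else
    pre ++ [pt]

def solution_alt (players : List Int) (m : Int) (k : Int) : Int :=
  PySem.List.pyGetD ((PySem.List.enumerate players 0).foldl (stepB m k) [0]) (-1) 0

-- ===== PRECONDITION & SPEC =====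
-- Pre_ excludes (a) m = 0 together with some player ≥ 0, where both Pythons raise
-- ZeroDivisionError at 'user // m', and (b) k ≤ 0, a nonpositive rental duration outside
-- the problem's natural domain: there A's deque front-match never fires so servers are
-- accidentally never returned, while B's fixed lookback window raises IndexError.
def Pre_solution (players : List Int) (m : Int) (k : Int) : Prop :=
  1 ≤ k ∧ (m ≠ 0 ∨ ∀ u ∈ players, u < 0)
instance (players : List Int) (m : Int) (k : Int) : Decidable (Pre_solution players m k) := by
  unfold Pre_solution; infer_instance
def pvWitness_solution : List Int × Int × Int := ([5, 2, 9, 0], 3, 2)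

def Spec_solution (players : List Int) (m : Int) (k : Int) (out : Int) : Prop := out = solution_alt players m k
instance (players : List Int) (m : Int) (k : Int) (out : Int) : Decidable (Spec_solution players m k out) := by unfold Spec_solution; infer_instance

-- ===== CLAIM (what is proved, stated in full; the proofs are below) =====
def Claim_equal_solution : Prop := ∀ (players : List Int) (m : Int) (k : Int), Dom_solution players m k → Pre_solution players m k → Spec_solution players m k (solution players m k)

-- ===== LEMMAS AND PROOFS =====

-- association-list lookup with default 0 (the count A's deque releases at a given minute)
def dqLook : List (Int × Int) → Int → Int
  | [], _ => 0
  | (t, v) :: rest, x => if t = x then v else dqLook rest x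

-- A's front pop, as a function of the minute
def popKey (dq : List (Int × Int)) (x : Int) : List (Int × Int) :=
  match dq with
  | [] => []
  | (t, _) :: rest => if t = x then rest else dq

lemma dqLook_eq_zero (dq : List (Int × Int)) (x : Int) (h : ∀ p ∈ dq, p.1 ≠ x) :
    dqLook dq x = 0 := by
  induction dq with
  | nil => rfl
  | cons p rest ih =>
    simp only [dqLook]
    rw [if_neg (h p (by simp))]
    exact ih (fun q hq => h q (by simp [hq]))

lemma dqLook_append_ne (l : List (Int × Int)) (a v t : Int) (h : a ≠ t) :
    dqLook (l ++ [(a, v)]) t = dqLook l t := by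
  induction l with
  | nil => simp [dqLook, h]
  | cons p rest ih => simp only [List.cons_append, dqLook, ih]

lemma dqLook_append_absent (l : List (Int × Int)) (a v : Int) (h : ∀ p ∈ l, p.1 ≠ a) :
    dqLook (l ++ [(a, v)]) a = v := by
  induction l with
  | nil => simp [dqLook]
  | cons p rest ih =>
    simp only [List.cons_append, dqLook]
    rw [if_neg (h p (by simp))]
    exact ih (fun q hq => h q (by simp [hq]))

lemma mem_popKey (dq : List (Int × Int)) (x : Int) (p : Int × Int) (h : p ∈ popKey dq x) :
    p ∈ dq := by
  cases dq with
  | nil => simp [popKey] at h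
  | cons q rest =>
    simp only [popKey] at h
    split at h
    · exact List.mem_cons_of_mem _ h
    · exact h

lemma pairwise_popKey (dq : List (Int × Int)) (x : Int)
    (h : dq.Pairwise (fun p q => p.1 < q.1)) :
    (popKey dq x).Pairwise (fun p q => p.1 < q.1) := by
  cases dq with
  | nil => simp [popKey] at h ⊢
  | cons q rest =>
    simp only [popKey]
    split
    · exact (List.pairwise_cons.mp h).2
    · exact h

lemma mem_popKey_gt (dq : List (Int × Int)) (x : Int)
    (hs : dq.Pairwise (fun p q => p.1 < q.1)) (hb : ∀ p ∈ dq, x ≤ p.1)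
    (p : Int × Int) (h : p ∈ popKey dq x) : x < p.1 := by
  cases dq with
  | nil => simp [popKey] at h
  | cons q rest =>
    simp only [popKey] at h
    rcases List.pairwise_cons.mp hs with ⟨hq, _⟩
    split at h
    · next heq => have := hq p h; omega
    · next hne =>
      rcases List.mem_cons.mp h with rfl | hmem
      · have := hb p (by simp); omega
      · have h1 := hb q (by simp)
        have := hq p hmem
        omega

lemma dqLook_popKey (dq : List (Int × Int)) (x t : Int) (h : t ≠ x) :
    dqLook (popKey dq x) t = dqLook dq t := by
  cases dq with
  | nil => rfl
  | cons q rest =>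
    simp only [popKey]
    split
    · next heq =>
      obtain ⟨a, v⟩ := q
      simp only at heq
      subst heq
      simp [dqLook, Ne.symm h]
    · rfl

-- A's step, characterized: when the deque is sorted and lower-bounded by the minute,
-- the pop branch releases exactly dqLook dq i servers and removes exactly the key-i entry
lemma stepA_char (m k : Int) (dq : List (Int × Int)) (cc : Int × Int) (i x : Int)
    (hs : dq.Pairwise (fun p q => p.1 < q.1)) (hb : ∀ p ∈ dq, i ≤ p.1) :
    stepA m k (dq, cc) (i, x) =
      (if x > (cc.2 - dqLook dq i) * m - 1 then
        (popKey dq i ++ [(i + k, PySem.Int.floordiv x m - ((cc.2 - dqLook dq i) - 1))],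
         cc.1 + (PySem.Int.floordiv x m - ((cc.2 - dqLook dq i) - 1)),
         (cc.2 - dqLook dq i) + (PySem.Int.floordiv x m - ((cc.2 - dqLook dq i) - 1)))
      else (popKey dq i, cc.1, cc.2 - dqLook dq i)) := by
  cases dq with
  | nil => simp [stepA, popKey, dqLook]
  | cons q rest =>
    obtain ⟨t, sn⟩ := q
    by_cases h : t = i
    · subst h; simp [stepA, popKey, dqLook]
    · have hz : dqLook rest i = 0 := by
        apply dqLook_eq_zero
        intro p hp
        have h1 := hb (t, sn) (by simp)
        have h2 := (List.pairwise_cons.mp hs).1 p hp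
        simp only at h1 h2
        omega
      simp [stepA, popKey, dqLook, h, hz]

-- index lemmas for the prefix list (all indices nonnegative and in range)
lemma pg_append_lt (P : List Int) (v : Int) (j : Int) (h0 : 0 ≤ j) (h : j < (P.length : Int)) :
    PySem.List.pyGetD (P ++ [v]) j 0 = PySem.List.pyGetD P j 0 := by
  obtain ⟨jn, rfl⟩ : ∃ jn : Nat, j = (jn : Int) := ⟨j.toNat, by omega⟩
  rw [PySem.List.pyGetD_natCast, PySem.List.pyGetD_natCast,
      List.getD_eq_getElem?_getD, List.getD_eq_getElem?_getD,
      List.getElem?_append_left (by exact_mod_cast h)]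

lemma pg_append_len (P : List Int) (v : Int) :
    PySem.List.pyGetD (P ++ [v]) (P.length : Int) 0 = v := by
  rw [PySem.List.pyGetD_natCast, List.getD_eq_getElem?_getD, List.getElem?_concat_length]
  rfl

-- with |P| = n + 1, the prefix list's last entry is both P[-1] and P[n]
lemma pg_last (P : List Int) (n : Nat) (h : P.length = n + 1) :
    PySem.List.pyGetD P (-1) 0 = PySem.List.pyGetD P (n : Int) 0 := by
  have hne : P ≠ [] := by intro e; rw [e] at h; simp at h
  rw [PySem.List.pyGetD_neg_one P 0 hne, PySem.List.pyGetD_natCast,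
      List.getLast_eq_getElem, List.getD_eq_getElem?_getD,
      List.getElem?_eq_getElem (by omega)]
  simp only [Option.getD_some]
  congr 1
  omega

-- lifting a prefix read over the appended entry, and reading the appended entry
lemma pg_lift (P : List Int) (v : Int) (n : Nat) (hlen : P.length = n + 1) (j : Int)
    (h0 : 0 ≤ j) (hj : j ≤ (n : Int)) :
    PySem.List.pyGetD (P ++ [v]) j 0 = PySem.List.pyGetD P j 0 :=
  pg_append_lt P v j h0 (by omega)

lemma pg_top (P : List Int) (v : Int) (n : Nat) (hlen : P.length = n + 1) :
    PySem.List.pyGetD (P ++ [v]) ((n : Int) + 1) 0 = v := by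
  have e : (n : Int) + 1 = (P.length : Int) := by omega
  rw [e, pg_append_len]

-- main loop invariant (k ≥ 1): entering minute n with A-state (dq, cnt, cur) and B-prefix P,
-- cnt is P's last entry, cur is 1 + the lookback difference before the minute-n release,
-- and each pending release dqLook dq t is the prefix increment of minute t-k
lemma loop_inv (m k : Int) (hk : 1 ≤ k) :
    ∀ (xs : List Int) (n : Nat) (dq : List (Int × Int)) (cnt cur : Int) (P : List Int),
    P.length = n + 1 →
    dq.Pairwise (fun p q => p.1 < q.1) →
    (∀ p ∈ dq, (n : Int) ≤ p.1 ∧ p.1 < (n : Int) + k) →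
    cnt = PySem.List.pyGetD P (n : Int) 0 →
    cur = 1 + PySem.List.pyGetD P (n : Int) 0 - PySem.List.pyGetD P (max ((n : Int) - k) 0) 0 →
    (∀ t : Int, (n : Int) ≤ t → t < (n : Int) + k →
        dqLook dq t = PySem.List.pyGetD P (max (t - k + 1) 0) 0 - PySem.List.pyGetD P (max (t - k) 0) 0) →
    ((PySem.List.enumerate xs (n : Int)).foldl (stepA m k) (dq, cnt, cur)).2.1
      = PySem.List.pyGetD ((PySem.List.enumerate xs (n : Int)).foldl (stepB m k) P) (-1) 0 := by
  intro xs
  induction xs with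
  | nil =>
    intro n dq cnt cur P hlen _ _ hcnt _ _
    simp only [PySem.List.enumerate_nil, List.foldl_nil]
    rw [pg_last P n hlen]
    exact hcnt
  | cons x xs ih =>
    intro n dq cnt cur P hlen hs hb hcnt hcur hlook
    have hbl : ∀ p ∈ dq, (n : Int) ≤ p.1 := fun p hp => (hb p hp).1
    rw [PySem.List.enumerate_cons, List.foldl_cons, List.foldl_cons,
        stepA_char m k dq (cnt, cur) (n : Int) x hs hbl]
    simp only [stepB]
    set pt := PySem.List.pyGetD P ((n : Int)) 0 with hpt
    set pa := PySem.List.pyGetD P (max ((n : Int) - k + 1) 0) 0 with hpa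
    have hdqn : dqLook dq (n : Int) = pa - PySem.List.pyGetD P (max ((n : Int) - k) 0) 0 :=
      hlook n le_rfl (by omega)
    have hcc : cur - dqLook dq (n : Int) = pt - pa + 1 := by rw [hdqn, hcur]; ring
    rw [hcc]
    have hca : ((n : Int) + 1) = ((n + 1 : Nat) : Int) := by push_cast; ring
    by_cases hx : x > (pt - pa + 1) * m - 1
    · rw [if_pos hx, if_pos hx]
      set need := PySem.Int.floordiv x m - (pt - pa) with hneed
      have e : PySem.Int.floordiv x m - (pt - pa + 1 - 1) = need := by rw [hneed]; ring
      have ev : pt + PySem.Int.floordiv x m - (pt - pa) = pt + need := by rw [hneed]; ring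
      rw [e, ev, hca]
      apply ih (n + 1) _ (cnt + need) _ (P ++ [pt + need])
      · simp [hlen]
      · rw [List.pairwise_append]
        refine ⟨pairwise_popKey dq _ hs, by simp, ?_⟩
        intro p hp q hq
        rcases List.mem_singleton.mp hq with rfl
        exact (hb p (mem_popKey dq _ p hp)).2
      · intro p hp
        push_cast
        rcases List.mem_append.mp hp with hmem | hmem
        · have h1 := (hb p (mem_popKey dq _ p hmem)).2
          have h2 := mem_popKey_gt dq _ hs hbl p hmem
          omega
        · rcases List.mem_singleton.mp hmem with rfl
          dsimp only
          omega
      · push_cast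
        rw [pg_top P (pt + need) n hlen, hcnt]
      · push_cast
        have e1 : max ((n : Int) + 1 - k) 0 = max ((n : Int) - k + 1) 0 := by omega
        rw [pg_top P (pt + need) n hlen, e1,
            pg_lift P (pt + need) n hlen _ (by omega) (by omega), ← hpa]
        ring
      · intro t ht1 ht2
        push_cast at ht1 ht2
        by_cases hte : t = (n : Int) + k
        · subst hte
          rw [dqLook_append_absent]
          · have e1 : max ((n : Int) + k - k + 1) 0 = (n : Int) + 1 := by omega
            have e2 : max ((n : Int) + k - k) 0 = (n : Int) := by omega
            rw [e1, e2, pg_top P (pt + need) n hlen,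
                pg_lift P (pt + need) n hlen _ (by omega) (by omega), ← hpt]
            ring
          · intro p hp
            have := (hb p (mem_popKey dq _ p hp)).2
            omega
        · rw [dqLook_append_ne _ _ _ _ (by omega), dqLook_popKey dq _ t (by omega),
              hlook t (by omega) (by omega),
              pg_lift P (pt + need) n hlen _ (by omega) (by omega),
              pg_lift P (pt + need) n hlen _ (by omega) (by omega)]
    · rw [if_neg hx, if_neg hx, hca]
      apply ih (n + 1) _ cnt _ (P ++ [pt])
      · simp [hlen]
      · exact pairwise_popKey dq _ hs
      · intro p hp
        push_cast
        have h1 := (hb p (mem_popKey dq _ p hp)).2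
        have h2 := mem_popKey_gt dq _ hs hbl p hp
        omega
      · push_cast
        rw [pg_top P pt n hlen, hcnt]
      · push_cast
        have e1 : max ((n : Int) + 1 - k) 0 = max ((n : Int) - k + 1) 0 := by omega
        rw [pg_top P pt n hlen, e1,
            pg_lift P pt n hlen _ (by omega) (by omega), ← hpa]
        ring
      · intro t ht1 ht2
        push_cast at ht1 ht2
        by_cases hte : t = (n : Int) + k
        · subst hte
          rw [dqLook_eq_zero]
          · have e1 : max ((n : Int) + k - k + 1) 0 = (n : Int) + 1 := by omega
            have e2 : max ((n : Int) + k - k) 0 = (n : Int) := by omega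
            rw [e1, e2, pg_top P pt n hlen,
                pg_lift P pt n hlen _ (by omega) (by omega), ← hpt]
            ring
          · intro p hp
            have := (hb p (mem_popKey dq _ p hp)).2
            omega
        · rw [dqLook_popKey dq _ t (by omega),
              hlook t (by omega) (by omega),
              pg_lift P pt n hlen _ (by omega) (by omega),
              pg_lift P pt n hlen _ (by omega) (by omega)]

-- ===== VERDICT (by name: the statement is the Claim_ definition above) =====
theorem solution_spec : Claim_equal_solution := by
  unfold Claim_equal_solution
  intro players m k _ hpre
  obtain ⟨hk, -⟩ := hpre
  unfold Spec_solution solution solution_alt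
  have h := loop_inv m k hk players 0 [(0, 0)] 0 1 [0]
    (by simp)
    (by simp)
    (by intro p hp; rcases List.mem_singleton.mp hp with rfl; constructor <;> simp only [] <;> omega)
    (by simp [PySem.List.pyGetD])
    (by simp only [Nat.cast_zero]
        have h0 : max ((0 : Int) - k) 0 = 0 := by omega
        rw [h0]; simp [PySem.List.pyGetD])
    (by intro t ht1 ht2
        have e1 : max (t - k + 1) 0 = 0 := by omega
        have e2 : max (t - k) 0 = 0 := by omega
        rw [e1, e2, sub_self]
        simp [dqLook])
  simpa using h
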